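-- pv_equiv track=rewrite | github.com/calliope-project/euro-calliope | scripts/net_self_sufficiency.py | _connect_regions
-- ===== SOURCE A (Python) =====
-- def _connect_regions(groups, connected_regions):
--     if all([region1 in groups.keys() and region2 in groups.keys()
--             for region1, region2 in connected_regions]):
--         # config is valid, and resolution is regional. apply config
--         for region1, region2 in connected_regions:
--             groups[region1] = [region1, region2]
--             del groups[region2]
--         return groups
--     elif all([region1 not in groups.keys() and region2 not in groups.keys()
--               for region1, region2 in connected_regions]):
--         # config is valid, but resolution is not regional. do nothing
--         return groups
--     else:
--         raise ValueError("Config of connected regions is invalid.")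
-- ===== SOURCE B (Python) =====
-- def _apply_pairs(groups, pairs):
--     if not pairs:
--         return groups
--     region1, region2 = pairs[0]
--     groups[region1] = [region1, region2]
--     del groups[region2]
--     return _apply_pairs(groups, pairs[1:])
--
--
-- def _connect_regions(groups, connected_regions):
--     # Flatten the pairs into one region set and decide by set algebra on the
--     # key view: subset -> apply, disjoint -> no-op, otherwise invalid.
--     regions = {region for pair in connected_regions for region in pair}
--     if regions <= groups.keys():
--         return _apply_pairs(groups, list(connected_regions))
--     if regions.isdisjoint(groups.keys()):
--         return groups
--     raise ValueError("Config of connected regions is invalid.")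
-- ===== Notes on version B (the rewrite author's own statement) =====
-- stated objective: simpler
-- what changed: A's two per-pair all(...) comprehension scans are replaced by set algebra: the pairs are flattened into one region set and the branch is decided by a subset test and a disjointness test against the dict's key view; the merge itself becomes a recursive helper instead of A's for-loop.
import Mathlib
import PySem

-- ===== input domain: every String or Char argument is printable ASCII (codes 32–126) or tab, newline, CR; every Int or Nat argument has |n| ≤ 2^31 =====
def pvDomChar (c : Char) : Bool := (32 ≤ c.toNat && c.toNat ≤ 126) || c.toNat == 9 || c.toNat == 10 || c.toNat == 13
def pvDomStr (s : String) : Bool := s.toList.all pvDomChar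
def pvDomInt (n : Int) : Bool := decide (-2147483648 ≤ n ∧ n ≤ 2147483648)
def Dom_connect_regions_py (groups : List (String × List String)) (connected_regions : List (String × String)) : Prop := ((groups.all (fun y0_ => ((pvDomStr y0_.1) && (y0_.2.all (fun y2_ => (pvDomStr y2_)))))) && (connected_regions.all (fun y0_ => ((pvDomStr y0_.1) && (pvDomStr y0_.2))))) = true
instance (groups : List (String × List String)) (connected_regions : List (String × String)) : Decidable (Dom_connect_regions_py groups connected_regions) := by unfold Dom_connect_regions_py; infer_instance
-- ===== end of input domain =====

-- B replaces A's two per-pair all(...) scans by set algebra (flattened region set, subset /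
-- disjointness tests on the key view) and turns the merge for-loop into a recursive helper
-- (objective: simpler decomposition; same cost).
-- Both A and B mutate `groups` in place in Python; the equivalence proved here is about the return value.

-- ===== PORT A =====
-- both regions of the pair are keys of groups
def pvBothIn (g : PySem.Dict String (List String)) (p : String × String) : Bool :=
  g.contains p.1 && g.contains p.2

-- neither region of the pair is a key of groups
def pvNeitherIn (g : PySem.Dict String (List String)) (p : String × String) : Bool :=
  !(g.contains p.1) && !(g.contains p.2)

-- the merge loop: groups[r1] = [r1, r2]; del groups[r2]  (erase is total; the KeyError inputs are outside Pre_)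
def pvMergeLoop (g : PySem.Dict String (List String)) (cr : List (String × String)) : PySem.Dict String (List String) :=
  cr.foldl (fun d p => (d.insert p.1 [p.1, p.2]).erase p.2) g

def connect_regions_py (groups : List (String × List String)) (connected_regions : List (String × String)) : List (String × List String) :=
  let g := PySem.Dict.mk groups
  if connected_regions.all (fun p => pvBothIn g p) then
    (pvMergeLoop g connected_regions).items
  else if connected_regions.all (fun p => pvNeitherIn g p) then
    g.items
  else
    g.items  -- Python raises ValueError here; unreachable under Pre_

-- ===== PORT B =====
-- _apply_pairs: recursive merge of the pairs (erase is total; KeyError inputs are outside Pre_)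
def pvApplyPairs (g : PySem.Dict String (List String)) : List (String × String) → PySem.Dict String (List String)
  | [] => g
  | p :: ps => pvApplyPairs ((g.insert p.1 [p.1, p.2]).erase p.2) ps

def connect_regions_py_alt (groups : List (String × List String)) (connected_regions : List (String × String)) : List (String × List String) :=
  let g := PySem.Dict.mk groups
  let regions : PySem.Set String := PySem.Set.ofList (connected_regions.flatMap (fun p => [p.1, p.2]))
  if PySem.Set.issubset regions g.keys then
    (pvApplyPairs g connected_regions).items
  else if PySem.Set.isdisjoint regions g.keys then
    g.items
  else
    g.items  -- Python raises ValueError here; unreachable under Pre_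

-- ===== PRECONDITION & SPEC =====
-- the merge loop's `del groups[r2]` succeeds at step i iff r1=r2 (just re-inserted) or the last
-- earlier pair touching r2 did not delete it; closed form over the input list:
def pvDelOk (cr : List (String × String)) : Bool :=
  (List.range cr.length).all (fun i =>
    let p := cr.getD i ("", "")
    p.1 == p.2 ||
      (match (cr.take i).reverse.find? (fun q => q.1 == p.2 || q.2 == p.2) with
       | none => true
       | some q => q.2 != p.2))

-- Pre_ excludes exactly the inputs where Python A raises: the mixed configurations (ValueError)
-- and, in the all-in branch, pairs whose second region was already deleted (KeyError).
def Pre_connect_regions_py (groups : List (String × List String)) (connected_regions : List (String × String)) : Prop :=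
  (let g := PySem.Dict.mk groups
   (connected_regions.all (fun p => pvBothIn g p) && pvDelOk connected_regions)
   || (!(connected_regions.all (fun p => pvBothIn g p)) && connected_regions.all (fun p => pvNeitherIn g p))) = true

instance (groups : List (String × List String)) (connected_regions : List (String × String)) : Decidable (Pre_connect_regions_py groups connected_regions) := by unfold Pre_connect_regions_py; infer_instance

def pvWitness_connect_regions_py : (List (String × List String)) × (List (String × String)) :=
  ([("a", ["a"]), ("b", ["b"]), ("c", ["c"])], [("a", "b")])

def Spec_connect_regions_py (groups : List (String × List String)) (connected_regions : List (String × String)) (out : List (String × List String)) : Prop := out = connect_regions_py_alt groups connected_regions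
instance (groups : List (String × List String)) (connected_regions : List (String × String)) (out : List (String × List String)) : Decidable (Spec_connect_regions_py groups connected_regions out) := by unfold Spec_connect_regions_py; infer_instance

-- ===== CLAIM (what is proved, stated in full; the proofs are below) =====
def Claim_equal_connect_regions_py : Prop := ∀ (groups : List (String × List String)) (connected_regions : List (String × String)), Dom_connect_regions_py groups connected_regions → Pre_connect_regions_py groups connected_regions → Spec_connect_regions_py groups connected_regions (connect_regions_py groups connected_regions)

-- ===== LEMMAS AND PROOFS =====

-- B's subset test (regions ⊆ groups.keys()) coincides with A's first all(...) scan
theorem pv_cond_sub (g : PySem.Dict String (List String)) (cr : List (String × String)) :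
    PySem.Set.issubset (PySem.Set.ofList (cr.flatMap (fun p => [p.1, p.2]))) g.keys
      = cr.all (fun p => pvBothIn g p) := by
  rw [Bool.eq_iff_iff, PySem.Set.issubset_iff, List.all_eq_true]
  constructor
  · intro h p hp
    have h1 := h p.1 (by rw [PySem.Set.mem_ofList]; exact List.mem_flatMap.mpr ⟨p, hp, by simp⟩)
    have h2 := h p.2 (by rw [PySem.Set.mem_ofList]; exact List.mem_flatMap.mpr ⟨p, hp, by simp⟩)
    simp [pvBothIn, PySem.Dict.contains_iff_mem_keys, h1, h2]
  · intro h x hx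
    rw [PySem.Set.mem_ofList] at hx
    obtain ⟨p, hp, hxp⟩ := List.mem_flatMap.mp hx
    have := h p hp
    simp only [pvBothIn, Bool.and_eq_true, PySem.Dict.contains_iff_mem_keys] at this
    simp only [List.mem_cons, List.not_mem_nil, or_false] at hxp
    rcases hxp with rfl | rfl
    · exact this.1
    · exact this.2

-- B's disjointness test (regions ∩ groups.keys() = ∅) coincides with A's second all(...) scan
theorem pv_cond_dis (g : PySem.Dict String (List String)) (cr : List (String × String)) :
    PySem.Set.isdisjoint (PySem.Set.ofList (cr.flatMap (fun p => [p.1, p.2]))) g.keys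
      = cr.all (fun p => pvNeitherIn g p) := by
  rw [Bool.eq_iff_iff, PySem.Set.isdisjoint_iff, List.all_eq_true]
  constructor
  · intro h p hp
    have h1 := h p.1 (by rw [PySem.Set.mem_ofList]; exact List.mem_flatMap.mpr ⟨p, hp, by simp⟩)
    have h2 := h p.2 (by rw [PySem.Set.mem_ofList]; exact List.mem_flatMap.mpr ⟨p, hp, by simp⟩)
    have c1 : g.contains p.1 = false := by
      rw [Bool.eq_false_iff]
      intro hc
      rw [PySem.Dict.contains_iff_mem_keys] at hc
      exact h1 hc
    have c2 : g.contains p.2 = false := by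
      rw [Bool.eq_false_iff]
      intro hc
      rw [PySem.Dict.contains_iff_mem_keys] at hc
      exact h2 hc
    simp [pvNeitherIn, c1, c2]
  · intro h x hx
    rw [PySem.Set.mem_ofList] at hx
    obtain ⟨p, hp, hxp⟩ := List.mem_flatMap.mp hx
    have := h p hp
    simp only [pvNeitherIn, Bool.and_eq_true, Bool.not_eq_true', ← PySem.Dict.contains_iff_mem_keys] at *
    simp only [List.mem_cons, List.not_mem_nil, or_false] at hxp
    rcases hxp with rfl | rfl
    · simp [this.1]
    · simp [this.2]

-- B's recursive merge computes A's merge fold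
theorem pv_apply_eq (cr : List (String × String)) (g : PySem.Dict String (List String)) :
    pvApplyPairs g cr = pvMergeLoop g cr := by
  induction cr generalizing g with
  | nil => rfl
  | cons p ps ih => simp [pvApplyPairs, pvMergeLoop, List.foldl_cons, ih, pvMergeLoop]

-- ===== VERDICT (by name: the statement is the Claim_ definition above) =====
theorem connect_regions_py_spec : Claim_equal_connect_regions_py := by
  intro groups cr _ _
  unfold Spec_connect_regions_py connect_regions_py connect_regions_py_alt
  dsimp only
  rw [pv_cond_sub, pv_cond_dis, pv_apply_eq]
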